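-- pv_equiv track=rewrite | github.com/djliden/dbx-aidev | src/cli/commands/dbai.py | _extract_databricks_section
-- ===== SOURCE A (Python) =====
-- def _extract_databricks_section(content: str) -> str:
--   """Extract the Databricks-specific section from template CLAUDE.md."""
--   lines = content.split('\n')
--
--   # Find the start of Databricks content (after the first heading)
--   start_idx = 0
--   for i, line in enumerate(lines):
--     if line.startswith('# Databricks AI Development Setup Tool'):
--       start_idx = i
--       break
--
--   return '\n'.join(lines[start_idx:])
-- ===== SOURCE B (Python) =====
-- def _extract_databricks_section(content: str) -> str:
--     """Extract the Databricks-specific section from template CLAUDE.md."""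
--     marker = '# Databricks AI Development Setup Tool'
--     if content.startswith(marker):
--         return content
--     idx = content.find('\n' + marker)
--     if idx == -1:
--         return content
--     return content[idx + 1:]
-- ===== Notes on version B (the rewrite author's own statement) =====
-- stated objective: idiomatic
-- what changed: Replaces the split-into-lines / enumerate loop / rejoin pipeline with a direct substring search on the raw string: check the first line via startswith, otherwise find the first newline-preceded marker occurrence and return the suffix after it.
import Mathlib
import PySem

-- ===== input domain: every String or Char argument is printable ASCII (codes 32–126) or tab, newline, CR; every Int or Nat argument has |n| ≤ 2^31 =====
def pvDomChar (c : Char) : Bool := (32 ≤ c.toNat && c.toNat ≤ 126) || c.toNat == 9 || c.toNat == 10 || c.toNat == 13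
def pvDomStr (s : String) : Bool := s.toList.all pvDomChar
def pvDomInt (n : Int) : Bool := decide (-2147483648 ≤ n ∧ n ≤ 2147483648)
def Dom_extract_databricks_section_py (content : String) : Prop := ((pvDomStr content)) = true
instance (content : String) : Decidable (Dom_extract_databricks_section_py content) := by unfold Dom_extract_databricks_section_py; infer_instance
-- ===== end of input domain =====

-- B replaces A's split-into-lines / enumerate-loop / rejoin pipeline with a direct
-- substring search on the raw string (startswith for the first line, find of the
-- newline-preceded marker otherwise); same return value, different representation (idiomatic).

-- ===== PORT A =====
-- the 'for i, line in enumerate(lines): if line.startswith(...): start_idx = i; break' loop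
def pvLoopA : List (Int × List Char) → Int
  | [] => 0
  | (i, line) :: rest =>
    if PySem.Chars.startswith line ("# Databricks AI Development Setup Tool".toList) then i
    else pvLoopA rest

def extract_databricks_section_py (content : String) : String :=
  let lines := PySem.Chars.splitOn content.toList "\n".toList
  let start_idx := pvLoopA (PySem.List.enumerate lines)
  String.ofList (PySem.Chars.join "\n".toList (PySem.List.slice lines (some start_idx) none))

-- ===== PORT B =====
def extract_databricks_section_py_alt (content : String) : String :=
  let marker := "# Databricks AI Development Setup Tool"
  if PySem.Str.startswith content marker then content
  else
    let idx := PySem.Str.find content ("\n" ++ marker)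
    if idx = -1 then content
    else PySem.Str.slice content (some (idx + 1)) none

-- ===== PRECONDITION & SPEC =====
def Spec_extract_databricks_section_py (content : String) (out : String) : Prop := out = extract_databricks_section_py_alt content
instance (content : String) (out : String) : Decidable (Spec_extract_databricks_section_py content out) := by unfold Spec_extract_databricks_section_py; infer_instance

-- ===== CLAIM (what is proved, stated in full; the proofs are below) =====
def Claim_equal_extract_databricks_section_py : Prop := ∀ (content : String), Dom_extract_databricks_section_py content → Spec_extract_databricks_section_py content (extract_databricks_section_py content)

-- ===== LEMMAS AND PROOFS =====

def splitNL : List Char → List (List Char)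
  | [] => [[]]
  | c :: rest =>
    if c = '\n' then [] :: splitNL rest
    else
      match splitNL rest with
      | [] => [[c]]
      | h :: t => (c :: h) :: t

lemma splitNL_ne_nil (cs : List Char) : splitNL cs ≠ [] := by
  cases cs with
  | nil => simp [splitNL]
  | cons c rest =>
    simp only [splitNL]
    split
    · simp
    · split <;> simp

lemma splitOn_go_eq (fuel : Nat) (l cur : List Char) (acc : List (List Char))
    (h : l.length < fuel) :
    PySem.Chars.splitOn.go ['\n'] fuel l cur acc
      = acc.reverse ++ (splitNL l).modifyHead (cur.reverse ++ ·) := by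
  induction fuel generalizing l cur acc with
  | zero => omega
  | succ fuel ih =>
    cases l with
    | nil =>
      rw [PySem.Chars.splitOn.go.eq_2 _ _ _ _ (by omega)]
      simp [splitNL]
    | cons c rest =>
      rw [PySem.Chars.splitOn.go.eq_3]
      by_cases hc : c = '\n'
      · subst hc
        rw [if_pos (by simp)]
        have h' : rest.length < fuel := by simp at h; omega
        rw [ih _ _ _ (by simpa using h')]
        rcases hsp : splitNL rest with _ | ⟨hd, tl⟩
        · exact absurd hsp (splitNL_ne_nil rest)
        · simp [splitNL, hsp, List.modifyHead]
      · rw [if_neg (by simp [List.isPrefixOf]; intro hh; exact absurd hh.symm hc)]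
        rw [ih _ _ _ (by simp at h ⊢; omega)]
        simp only [splitNL, if_neg hc]
        rcases hsp : splitNL rest with _ | ⟨hd, tl⟩
        · exact absurd hsp (splitNL_ne_nil rest)
        · simp [List.modifyHead]

lemma splitOn_nl (cs : List Char) : PySem.Chars.splitOn cs ['\n'] = splitNL cs := by
  unfold PySem.Chars.splitOn
  rw [splitOn_go_eq _ _ _ _ (by omega)]
  rcases hsp : splitNL cs with _ | ⟨hd, tl⟩
  · exact absurd hsp (splitNL_ne_nil cs)
  · simp [List.modifyHead]

lemma join_cons (sep c : List Char) (h : List Char) (t : List (List Char)) :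
    PySem.Chars.join sep ((c ++ h) :: t) = c ++ PySem.Chars.join sep (h :: t) := by
  cases t with
  | nil => simp [PySem.Chars.join_singleton]
  | cons q rest => rw [PySem.Chars.join_cons_cons, PySem.Chars.join_cons_cons]; simp

lemma join_splitNL (cs : List Char) : PySem.Chars.join ['\n'] (splitNL cs) = cs := by
  induction cs with
  | nil => simp [splitNL, PySem.Chars.join_singleton]
  | cons c rest ih =>
    by_cases hc : c = '\n'
    · subst hc
      rw [show splitNL ('\n' :: rest) = [] :: splitNL rest from by simp [splitNL]]
      rcases hsp : splitNL rest with _ | ⟨hd, tl⟩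
      · exact absurd hsp (splitNL_ne_nil rest)
      · rw [PySem.Chars.join_cons_cons]
        rw [hsp] at ih
        simp [ih]
    · simp only [splitNL, if_neg hc]
      rcases hsp : splitNL rest with _ | ⟨hd, tl⟩
      · exact absurd hsp (splitNL_ne_nil rest)
      · have := join_cons ['\n'] [c] hd tl
        simp only [List.singleton_append] at this
        rw [this]
        rw [hsp] at ih
        simp [ih]

lemma splitNL_append (t r : List Char) (ht : '\n' ∉ t) :
    splitNL (t ++ '\n' :: r) = t :: splitNL r := by
  induction t with
  | nil => simp [splitNL]
  | cons a t ih =>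
    have ha : a ≠ '\n' := by intro h; exact ht (by simp [h])
    have ht' : '\n' ∉ t := fun h => ht (by simp [h])
    simp only [List.cons_append, splitNL, if_neg ha, ih ht']

lemma splitNL_of_not_mem (cs : List Char) (h : '\n' ∉ cs) : splitNL cs = [cs] := by
  induction cs with
  | nil => simp [splitNL]
  | cons c rest ih =>
    have hc : c ≠ '\n' := fun hh => h (by simp [hh])
    simp only [splitNL, if_neg hc, ih (fun hh => h (by simp [hh]))]

lemma decompNL (cs : List Char) :
    '\n' ∉ cs ∨ ∃ t r, cs = t ++ '\n' :: r ∧ '\n' ∉ t := by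
  induction cs with
  | nil => left; simp
  | cons c rest ih =>
    by_cases hc : c = '\n'
    · right; exact ⟨[], rest, by simp [hc], by simp⟩
    · rcases ih with h | ⟨t, r, rfl, ht⟩
      · left; simp [h]; exact fun hh => hc hh.symm
      · right; exact ⟨c :: t, r, by simp, by simp [ht]; exact fun hh => hc hh.symm⟩

lemma prefix_split (m t r : List Char) (hm : '\n' ∉ m) (_ht : '\n' ∉ t) :
    m <+: (t ++ '\n' :: r) ↔ m <+: t := by
  constructor
  · intro h
    by_cases hlen : m.length ≤ t.length
    · exact List.prefix_of_prefix_length_le h (List.prefix_append _ _) hlen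
    · exfalso
      have htm : t <+: m := List.prefix_of_prefix_length_le (List.prefix_append _ _) h (by omega)
      obtain ⟨u, hu⟩ := htm
      obtain ⟨s', hs⟩ := h
      rw [← hu, List.append_assoc] at hs
      have hus : u ++ s' = '\n' :: r := List.append_cancel_left hs
      cases u with
      | nil =>
        have := congrArg List.length hu
        simp at this
        omega
      | cons a u' =>
        have ha : a = '\n' := by simpa using congrArg (fun l => l.head?) hus
        apply hm
        rw [← hu, ha]
        simp
  · intro h; exact h.trans (List.prefix_append _ _)

lemma not_prefix_drop_lt (m t r : List Char) (ht : '\n' ∉ t) (i : Nat) (hi : i < t.length) :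
    ¬ ('\n' :: m) <+: (t ++ '\n' :: r).drop i := by
  intro h
  rw [List.drop_append, Nat.sub_eq_zero_of_le (by omega), List.drop_zero] at h
  rcases hd : t.drop i with _ | ⟨d, ds⟩
  · have h0 : t.length - i = 0 := by simpa using congrArg List.length hd
    omega
  · rw [hd] at h
    simp only [List.cons_append, List.cons_prefix_cons] at h
    apply ht
    have : d ∈ t.drop i := by rw [hd]; simp
    exact h.1 ▸ List.mem_of_mem_drop this

lemma find_eq_of (s sub : List Char) (k : Nat) (h1 : sub <+: s.drop k)
    (h2 : ∀ i < k, ¬ sub <+: s.drop i) : PySem.Chars.find s sub = (k : Int) := by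
  have hinf : sub <:+: s := h1.isInfix.trans (List.drop_suffix k s).isInfix
  have hnn : 0 ≤ PySem.Chars.find s sub := (PySem.Chars.find_nonneg_iff s sub).mpr hinf
  obtain ⟨hp, hmin⟩ := PySem.Chars.find_spec hnn
  rcases lt_trichotomy (PySem.Chars.find s sub).toNat k with h | h | h
  · exact absurd hp (h2 _ h)
  · omega
  · exact absurd h1 (hmin k h)

lemma find_no_newline (cs m : List Char) (h : '\n' ∉ cs) :
    PySem.Chars.find cs ('\n' :: m) = -1 := by
  rw [PySem.Chars.find_eq_neg_one_iff]
  intro hinf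
  exact h (hinf.mem (by simp))
lemma find_shift (m t r : List Char) (ht : '\n' ∉ t) :
    PySem.Chars.find (t ++ '\n' :: r) ('\n' :: m)
      = if m <+: r then (t.length : Int)
        else if PySem.Chars.find r ('\n' :: m) = -1 then -1
        else (t.length : Int) + 1 + PySem.Chars.find r ('\n' :: m) := by
  by_cases hp : m <+: r
  · rw [if_pos hp]
    apply find_eq_of
    · rw [List.drop_append, Nat.sub_self, List.drop_length, List.nil_append, List.drop_zero]
      exact List.cons_prefix_cons.mpr ⟨rfl, hp⟩
    · intro i hi
      exact not_prefix_drop_lt m t r ht i hi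
  · rw [if_neg hp]
    by_cases hf : PySem.Chars.find r ('\n' :: m) = -1
    · rw [if_pos hf]
      rw [PySem.Chars.find_eq_neg_one_iff] at hf ⊢
      intro hinf
      have hnn : 0 ≤ PySem.Chars.find (t ++ '\n' :: r) ('\n' :: m) :=
        (PySem.Chars.find_nonneg_iff _ _).mpr hinf
      obtain ⟨hpre, _⟩ := PySem.Chars.find_spec hnn
      set j := (PySem.Chars.find (t ++ '\n' :: r) ('\n' :: m)).toNat with hj
      rcases lt_trichotomy j t.length with h | h | h
      · exact not_prefix_drop_lt m t r ht j h hpre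
      · rw [h, List.drop_append, Nat.sub_self, List.drop_length, List.nil_append,
          List.drop_zero, List.cons_prefix_cons] at hpre
        exact hp hpre.2
      · rw [List.drop_append, List.drop_of_length_le (by omega)] at hpre
        rcases hk : j - t.length with _ | k
        · omega
        · rw [hk, List.drop_succ_cons] at hpre
          exact hf (hpre.isInfix.trans (List.drop_suffix k r).isInfix)
    · rw [if_neg hf]
      have hinf : ('\n' :: m) <:+: r := (PySem.Chars.find_ne_neg_one_iff r _).mp hf
      have hnn : 0 ≤ PySem.Chars.find r ('\n' :: m) := (PySem.Chars.find_nonneg_iff _ _).mpr hinf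
      obtain ⟨hpre, hmin⟩ := PySem.Chars.find_spec hnn
      set j := (PySem.Chars.find r ('\n' :: m)).toNat with hj
      have hje : PySem.Chars.find r ('\n' :: m) = (j : Int) := by omega
      rw [hje]
      have : (t.length : Int) + 1 + (j : Int) = ((t.length + 1 + j : Nat) : Int) := by push_cast; ring
      rw [this]
      apply find_eq_of
      · rw [List.drop_append, List.drop_of_length_le (by omega)]
        have : t.length + 1 + j - t.length = j + 1 := by omega
        rw [this, List.drop_succ_cons]
        exact hpre
      · intro i hi
        rcases lt_trichotomy i t.length with h | h | h
        · exact not_prefix_drop_lt m t r ht i h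
        · rw [h, List.drop_append, Nat.sub_self, List.drop_length, List.nil_append,
            List.drop_zero, List.cons_prefix_cons]
          rintro ⟨-, hpr⟩
          exact hp hpr
        · rw [List.drop_append, List.drop_of_length_le (by omega)]
          rcases hk : i - t.length with _ | k
          · omega
          · rw [List.drop_succ_cons]
            exact hmin k (by omega)

lemma anyQ (m : List Char) (hm : '\n' ∉ m) (r : List Char) :
    (splitNL r).any (fun l => PySem.Chars.startswith l m)
      = (PySem.Chars.startswith r m || decide (PySem.Chars.find r ('\n' :: m) ≠ -1)) := by
  induction hn : r.length using Nat.strong_induction_on generalizing r with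
  | _ n ih =>
  rcases decompNL r with h | ⟨t, r', rfl, ht⟩
  · rw [splitNL_of_not_mem r h, find_no_newline r m h]
    simp
  · rw [splitNL_append t r' ht]
    have hlen : r'.length < n := by subst hn; simp; omega
    rw [List.any_cons, ih r'.length (by omega) r' rfl]
    rw [find_shift m t r' ht]
    have hsw : PySem.Chars.startswith (t ++ '\n' :: r') m = PySem.Chars.startswith t m := by
      rcases hb : PySem.Chars.startswith t m with _ | _
      · rw [Bool.eq_false_iff]
        intro hh
        rw [PySem.Chars.startswith_iff] at hh
        rw [(prefix_split m t r' hm ht)] at hh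
        rw [← PySem.Chars.startswith_iff] at hh
        simp [hh] at hb
      · rw [PySem.Chars.startswith_iff] at hb ⊢
        exact (prefix_split m t r' hm ht).mpr hb
    rw [hsw]
    by_cases hp : m <+: r'
    · have : PySem.Chars.startswith r' m = true := (PySem.Chars.startswith_iff _ _).mpr hp
      rw [if_pos hp, this]
      simp only [Bool.true_or]
      simp
    · have hns : PySem.Chars.startswith r' m = false := by
        rw [Bool.eq_false_iff]; intro hh; exact hp ((PySem.Chars.startswith_iff _ _).mp hh)
      rw [if_neg hp, hns]
      by_cases hf : PySem.Chars.find r' ('\n' :: m) = -1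
      · rw [if_pos hf, hf]
        simp
      · rw [if_neg hf]
        have hinf : ('\n' :: m) <:+: r' := (PySem.Chars.find_ne_neg_one_iff r' _).mp hf
        have hnn : 0 ≤ PySem.Chars.find r' ('\n' :: m) := (PySem.Chars.find_nonneg_iff _ _).mpr hinf
        have h1 : decide (PySem.Chars.find r' ('\n' :: m) ≠ -1) = true := by simpa using hf
        have h2 : decide ((t.length : Int) + 1 + PySem.Chars.find r' ('\n' :: m) ≠ -1) = true := by
          simp; omega
        rw [h1, h2]
        simp
lemma pvLoopA_enum (ls : List (List Char)) (k : Int) :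
    pvLoopA (PySem.List.enumerate ls k)
      = if ls.any (fun l => PySem.Chars.startswith l ("# Databricks AI Development Setup Tool".toList))
        then k + (ls.findIdx (fun l => PySem.Chars.startswith l ("# Databricks AI Development Setup Tool".toList)) : Int)
        else 0 := by
  induction ls generalizing k with
  | nil => simp [PySem.List.enumerate, pvLoopA]
  | cons h t ih =>
    rw [PySem.List.enumerate_cons, pvLoopA]
    by_cases hh : PySem.Chars.startswith h ("# Databricks AI Development Setup Tool".toList) = true
    · rw [if_pos hh]
      have hany : ((h :: t).any fun l => PySem.Chars.startswith l ("# Databricks AI Development Setup Tool".toList)) = true := by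
        simp only [List.any_cons, hh, Bool.true_or]
      rw [if_pos hany, List.findIdx_cons]
      simp only [hh, cond_true, Nat.cast_zero, add_zero]
    · rw [if_neg hh, ih]
      rw [Bool.not_eq_true] at hh
      simp only [List.any_cons, hh, Bool.false_or, List.findIdx_cons, cond_false]
      split
      · push_cast; ring
      · rfl

lemma startswith_split (m t r : List Char) (hm : '\n' ∉ m) (ht : '\n' ∉ t) :
    PySem.Chars.startswith (t ++ '\n' :: r) m = PySem.Chars.startswith t m := by
  rcases hb : PySem.Chars.startswith t m with _ | _
  · rw [Bool.eq_false_iff]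
    intro hh
    rw [PySem.Chars.startswith_iff, prefix_split m t r hm ht, ← PySem.Chars.startswith_iff] at hh
    simp [hh] at hb
  · rw [PySem.Chars.startswith_iff] at hb ⊢
    exact (prefix_split m t r hm ht).mpr hb

lemma main_lemma (m : List Char) (hm : '\n' ∉ m) (cs : List Char) :
    PySem.Chars.join ['\n']
      (if (splitNL cs).any (fun l => PySem.Chars.startswith l m)
       then (splitNL cs).drop ((splitNL cs).findIdx (fun l => PySem.Chars.startswith l m))
       else splitNL cs)
      = (if PySem.Chars.startswith cs m then cs
         else if PySem.Chars.find cs ('\n' :: m) = -1 then cs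
         else cs.drop (PySem.Chars.find cs ('\n' :: m) + 1).toNat) := by
  induction hn : cs.length using Nat.strong_induction_on generalizing cs with
  | _ n ih =>
  rcases decompNL cs with h | ⟨t, r, rfl, ht⟩
  · rw [splitNL_of_not_mem cs h, find_no_newline cs m h]
    by_cases hs : PySem.Chars.startswith cs m = true
    · rw [if_pos hs]
      have hany : ([cs].any fun l => PySem.Chars.startswith l m) = true := by simp [hs]
      rw [if_pos hany, List.findIdx_cons]
      simp only [hs, cond_true, List.drop_zero]
      exact PySem.Chars.join_singleton _ _
    · rw [if_neg hs, if_pos rfl]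
      have hany : ([cs].any fun l => PySem.Chars.startswith l m) = false := by
        simp only [List.any_cons, List.any_nil, Bool.or_false]
        simpa using hs
      rw [hany]
      simp only [Bool.false_eq_true, if_false]
      exact PySem.Chars.join_singleton _ _
  · rw [splitNL_append t r ht]
    have hjoin : PySem.Chars.join ['\n'] (t :: splitNL r) = t ++ '\n' :: r := by
      have := join_splitNL (t ++ '\n' :: r)
      rwa [splitNL_append t r ht] at this
    by_cases hpt : PySem.Chars.startswith t m = true
    · have hsw : PySem.Chars.startswith (t ++ '\n' :: r) m = true := by
        rw [startswith_split m t r hm ht]; exact hpt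
      rw [if_pos hsw]
      have hany : ((t :: splitNL r).any fun l => PySem.Chars.startswith l m) = true := by
        simp [hpt]
      rw [if_pos hany, List.findIdx_cons]
      simp only [hpt, cond_true, List.drop_zero]
      exact hjoin
    · have hptf : PySem.Chars.startswith t m = false := by simpa using hpt
      have hsw : PySem.Chars.startswith (t ++ '\n' :: r) m = false := by
        rw [startswith_split m t r hm ht]; exact hptf
      rw [hsw]
      simp only [Bool.false_eq_true, if_false]
      rw [find_shift m t r ht]
      have hlen : r.length < n := by subst hn; simp; omega
      have ihr := ih r.length hlen r rfl
      have hany : ((t :: splitNL r).any fun l => PySem.Chars.startswith l m)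
          = (splitNL r).any (fun l => PySem.Chars.startswith l m) := by
        simp [hptf]
      have hidx : (t :: splitNL r).findIdx (fun l => PySem.Chars.startswith l m)
          = (splitNL r).findIdx (fun l => PySem.Chars.startswith l m) + 1 := by
        rw [List.findIdx_cons, hptf]
        rfl
      by_cases hpr : m <+: r
      · rw [if_pos hpr]
        have hsr : PySem.Chars.startswith r m = true := (PySem.Chars.startswith_iff _ _).mpr hpr
        have hanyr : (splitNL r).any (fun l => PySem.Chars.startswith l m) = true := by
          rw [anyQ m hm r, hsr]; simp
        rw [hany] at *
        rw [if_pos hanyr, hidx, List.drop_succ_cons]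
        rw [if_pos hanyr, if_pos hsr] at ihr
        rw [ihr]
        rw [if_neg (by omega : ¬ (t.length : Int) = -1)]
        have h1 : ((t.length : Int) + 1).toNat = t.length + 1 := by omega
        rw [h1, List.drop_append, List.drop_of_length_le (by omega)]
        have h2 : t.length + 1 - t.length = 1 := by omega
        rw [h2]
        simp
      · have hsr : PySem.Chars.startswith r m = false := by
          rw [Bool.eq_false_iff]
          intro hh
          exact hpr ((PySem.Chars.startswith_iff _ _).mp hh)
        rw [if_neg hpr]
        by_cases hfr : PySem.Chars.find r ('\n' :: m) = -1
        · rw [if_pos hfr, if_pos rfl]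
          have hanyr : (splitNL r).any (fun l => PySem.Chars.startswith l m) = false := by
            rw [anyQ m hm r, hsr, hfr]
            simp
          rw [hany, hanyr]
          simp only [Bool.false_eq_true, if_false]
          exact hjoin
        · rw [if_neg hfr]
          have hinf : ('\n' :: m) <:+: r := (PySem.Chars.find_ne_neg_one_iff r _).mp hfr
          have hnn : 0 ≤ PySem.Chars.find r ('\n' :: m) := (PySem.Chars.find_nonneg_iff _ _).mpr hinf
          rw [if_neg (by omega : ¬ (t.length : Int) + 1 + PySem.Chars.find r ('\n' :: m) = -1)]
          have hanyr : (splitNL r).any (fun l => PySem.Chars.startswith l m) = true := by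
            rw [anyQ m hm r]
            simp [hfr]
          rw [hany, if_pos hanyr, hidx, List.drop_succ_cons]
          rw [if_pos hanyr, hsr] at ihr
          simp only [Bool.false_eq_true, if_false, if_neg hfr] at ihr
          rw [ihr]
          have h1 : ((t.length : Int) + 1 + PySem.Chars.find r ('\n' :: m) + 1).toNat
              = t.length + 1 + (PySem.Chars.find r ('\n' :: m) + 1).toNat := by omega
          rw [h1, List.drop_append, List.drop_of_length_le (l := t) (by omega)]
          have h2 : t.length + 1 + (PySem.Chars.find r ('\n' :: m) + 1).toNat - t.length
              = (PySem.Chars.find r ('\n' :: m) + 1).toNat + 1 := by omega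
          rw [h2, List.drop_succ_cons, List.nil_append]

-- ===== VERDICT (by name: the statement is the Claim_ definition above) =====
theorem extract_databricks_section_py_spec : Claim_equal_extract_databricks_section_py := by
  intro content _
  unfold Spec_extract_databricks_section_py extract_databricks_section_py extract_databricks_section_py_alt
  have hm : '\n' ∉ ("# Databricks AI Development Setup Tool".toList) := by decide
  have hnl : "\n".toList = ['\n'] := by decide
  simp only [hnl]
  rw [splitOn_nl, pvLoopA_enum]
  have hfind : PySem.Str.find content ("\n" ++ "# Databricks AI Development Setup Tool")
      = PySem.Chars.find content.toList ('\n' :: "# Databricks AI Development Setup Tool".toList) := by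
    show PySem.Chars.find _ _ = _
    rw [String.toList_append, hnl]
    rfl
  have hmain := main_lemma _ hm content.toList
  by_cases hs : PySem.Chars.startswith content.toList ("# Databricks AI Development Setup Tool".toList) = true
  · have hsB : PySem.Str.startswith content "# Databricks AI Development Setup Tool" = true := by
      rw [PySem.Str.startswith_eq]; exact hs
    have hanyr : ((splitNL content.toList).any fun l => PySem.Chars.startswith l ("# Databricks AI Development Setup Tool".toList)) = true := by
      rw [anyQ _ hm, hs]; simp
    rw [if_pos hanyr, if_pos hsB]
    rw [if_pos hanyr, if_pos hs] at hmain
    rw [show ((0 : Int) + ((splitNL content.toList).findIdx fun l => PySem.Chars.startswith l ("# Databricks AI Development Setup Tool".toList) : Nat) : Int) = (((splitNL content.toList).findIdx fun l => PySem.Chars.startswith l ("# Databricks AI Development Setup Tool".toList) : Nat) : Int) from by omega]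
    rw [PySem.List.slice_from_natCast, hmain, String.ofList_toList]
  · have hsf : PySem.Chars.startswith content.toList ("# Databricks AI Development Setup Tool".toList) = false := by
      simpa using hs
    have hsB : PySem.Str.startswith content "# Databricks AI Development Setup Tool" = false := by
      rw [PySem.Str.startswith_eq]; exact hsf
    rw [hsf] at hmain
    simp only [Bool.false_eq_true, if_false] at hmain
    rw [hsB]
    simp only [Bool.false_eq_true, if_false]
    by_cases hf : PySem.Chars.find content.toList ('\n' :: "# Databricks AI Development Setup Tool".toList) = -1
    · have hfB : PySem.Str.find content ("\n" ++ "# Databricks AI Development Setup Tool") = -1 := by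
        rw [hfind]; exact hf
      have hanyr : ((splitNL content.toList).any fun l => PySem.Chars.startswith l ("# Databricks AI Development Setup Tool".toList)) = false := by
        rw [anyQ _ hm, hsf, hf]; simp
      rw [if_pos hf, hanyr] at hmain
      simp only [Bool.false_eq_true, if_false] at hmain
      rw [if_pos hfB, hanyr]
      simp only [Bool.false_eq_true, if_false]
      rw [show ((0:Int)) = ((0 : Nat) : Int) from rfl, PySem.List.slice_from_natCast, List.drop_zero]
      rw [hmain, String.ofList_toList]
    · have hfB : ¬ PySem.Str.find content ("\n" ++ "# Databricks AI Development Setup Tool") = -1 := by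
        rw [hfind]; exact hf
      rw [if_neg hfB]
      rw [if_neg hf] at hmain
      have hinf := (PySem.Chars.find_ne_neg_one_iff content.toList _).mp hf
      have hnn : 0 ≤ PySem.Chars.find content.toList ('\n' :: "# Databricks AI Development Setup Tool".toList) :=
        (PySem.Chars.find_nonneg_iff _ _).mpr hinf
      have hanyr : ((splitNL content.toList).any fun l => PySem.Chars.startswith l ("# Databricks AI Development Setup Tool".toList)) = true := by
        rw [anyQ _ hm, hsf]; simpa using hf
      rw [if_pos hanyr]
      rw [if_pos hanyr] at hmain
      rw [show ((0 : Int) + ((splitNL content.toList).findIdx fun l => PySem.Chars.startswith l ("# Databricks AI Development Setup Tool".toList) : Nat) : Int) = (((splitNL content.toList).findIdx fun l => PySem.Chars.startswith l ("# Databricks AI Development Setup Tool".toList) : Nat) : Int) from by omega]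
      rw [PySem.List.slice_from_natCast, hmain]
      show _ = String.ofList (PySem.Chars.slice _ _ _)
      unfold PySem.Chars.slice
      rw [hfind, PySem.List.slice_from _ (by omega)]
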